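-- pv_equiv track=rewrite | github.com/PurdueECE/action-foreach | test_data/run-20220411_174418/PurdueECE364-prelabs-wjorgebe/Prelab08/src/problems.py | convertToBoolean
-- ===== SOURCE A (Python) =====
-- def convertToBoolean(num, size):
--
--     if isinstance(num, int) is False or isinstance(size, int) is False:
--         return []
--     num_list = list(bin(num).replace("0b", ""))
--     bool_list = []
--     for i in num_list:
--         if i == '0':
--             bool_list.append(False)
--         elif i == '1':
--             bool_list.append(True)
--     while len(bool_list) < size:
--         bool_list.insert(0, False)
--
--     return bool_list
-- ===== SOURCE B (Python) =====
-- def convertToBoolean(num, size):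
--     if isinstance(num, int) is False or isinstance(size, int) is False:
--         return []
--     n = abs(num)
--     if n == 0:
--         bits = [False]
--     else:
--         bits = []
--         while n > 0:
--             bits.append(bool(n & 1))
--             n >>= 1
--         bits.reverse()
--     if len(bits) < size:
--         bits = [False] * (size - len(bits)) + bits
--     return bits
-- ===== Notes on version B (the rewrite author's own statement) =====
-- stated objective: faster
-- what changed: Replaces parsing the bin() string character by character and repeated insert(0,...) padding with arithmetic bit extraction (n&1, n>>=1) plus one reversal and a single list-concatenation pad.
import Mathlib
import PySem

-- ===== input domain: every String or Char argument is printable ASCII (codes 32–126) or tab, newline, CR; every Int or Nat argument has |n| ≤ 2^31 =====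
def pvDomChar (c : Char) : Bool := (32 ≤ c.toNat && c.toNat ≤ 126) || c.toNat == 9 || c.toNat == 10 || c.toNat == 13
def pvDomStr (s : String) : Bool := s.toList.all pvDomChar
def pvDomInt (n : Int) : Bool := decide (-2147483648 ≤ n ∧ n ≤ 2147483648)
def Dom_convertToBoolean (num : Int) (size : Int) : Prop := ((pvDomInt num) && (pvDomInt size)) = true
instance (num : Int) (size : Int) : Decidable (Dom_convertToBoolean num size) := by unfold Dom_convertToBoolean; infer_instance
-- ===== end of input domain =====

-- B replaces A's bin()-string parsing and repeated insert(0) padding with arithmetic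
-- bit extraction plus a single concatenation pad (idiomatic; same return value).


-- ===== PORT A =====
-- bin(n) for n > 0 (digits only, MSB first); hand port of the builtin, exact on Nat
def pvBinGo (n : Nat) : List Char :=
  if h : n = 0 then [] else pvBinGo (n / 2) ++ [if n % 2 = 1 then '1' else '0']
decreasing_by exact Nat.div_lt_self (Nat.pos_of_ne_zero h) (by omega)

-- list(bin(num).replace("0b", "")): optional '-' sign then the binary digits
def pvBin (num : Int) : List Char :=
  (if num < 0 then ['-'] else []) ++ (if num.natAbs = 0 then ['0'] else pvBinGo num.natAbs)

-- the while-loop padding: insert(0, False) while len < size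
def pvPadA (size : Int) (l : List Bool) : List Bool :=
  if h : (l.length : Int) < size then pvPadA size (false :: l) else l
termination_by (size - l.length).toNat
decreasing_by simp only [List.length_cons]; omega

def convertToBoolean (num : Int) (size : Int) : List Bool :=
  let boolList := (pvBin num).foldl
    (fun acc i => if i = '0' then acc ++ [false] else if i = '1' then acc ++ [true] else acc) []
  pvPadA size boolList

-- ===== PORT B =====
-- the while loop: bits.append(bool(n & 1)); n >>= 1
def pvLsb (n : Nat) (acc : List Bool) : List Bool :=
  if h : 0 < n then pvLsb (n / 2) (acc ++ [decide (n % 2 = 1)]) else acc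
decreasing_by exact Nat.div_lt_self h (by omega)

def convertToBoolean_alt (num : Int) (size : Int) : List Bool :=
  let n := num.natAbs
  let bits := if n = 0 then [false] else (pvLsb n []).reverse
  if (bits.length : Int) < size then
    List.replicate (size - bits.length).toNat false ++ bits
  else bits

-- ===== PRECONDITION & SPEC =====
def Spec_convertToBoolean (num : Int) (size : Int) (out : List Bool) : Prop := out = convertToBoolean_alt num size
instance (num : Int) (size : Int) (out : List Bool) : Decidable (Spec_convertToBoolean num size out) := by unfold Spec_convertToBoolean; infer_instance

-- ===== CLAIM (what is proved, stated in full; the proofs are below) =====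
def Claim_equal_convertToBoolean : Prop := ∀ (num : Int) (size : Int), Dom_convertToBoolean num size → Spec_convertToBoolean num size (convertToBoolean num size)

-- ===== LEMMAS AND PROOFS =====

-- LSB-first bit list, the common characterisation of both loops
def pvBits (n : Nat) : List Bool :=
  if h : n = 0 then [] else decide (n % 2 = 1) :: pvBits (n / 2)
decreasing_by exact Nat.div_lt_self (Nat.pos_of_ne_zero h) (by omega)

theorem pvLsb_eq (n : Nat) : ∀ acc, pvLsb n acc = acc ++ pvBits n := by
  induction n using Nat.strong_induction_on with
  | _ n ih =>
    intro acc
    rw [pvLsb, pvBits]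
    by_cases h : n = 0
    · simp [h]
    · simp only [Nat.pos_of_ne_zero h, dif_pos, dif_neg h]
      rw [ih (n / 2) (Nat.div_lt_self (Nat.pos_of_ne_zero h) (by omega))]
      simp

def pvStep (acc : List Bool) (i : Char) : List Bool :=
  if i = '0' then acc ++ [false] else if i = '1' then acc ++ [true] else acc

theorem foldA_binGo (n : Nat) : ∀ acc, (pvBinGo n).foldl pvStep acc = acc ++ (pvBits n).reverse := by
  induction n using Nat.strong_induction_on with
  | _ n ih =>
    intro acc
    rw [pvBinGo, pvBits]
    by_cases h : n = 0
    · simp [h]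
    · simp only [dif_neg h, List.foldl_append]
      rw [ih (n / 2) (Nat.div_lt_self (Nat.pos_of_ne_zero h) (by omega))]
      by_cases h2 : n % 2 = 1 <;> simp [h2, pvStep]

theorem pvPadA_eq (size : Int) (l : List Bool) :
    pvPadA size l = List.replicate (size - l.length).toNat false ++ l := by
  generalize hk : (size - l.length).toNat = k
  induction k generalizing l with
  | zero => rw [pvPadA]; have : ¬ ((l.length : Int) < size) := by omega
            simp [this]
  | succ k ih =>
    rw [pvPadA]
    have hlt : (l.length : Int) < size := by omega
    simp only [dif_pos hlt]
    rw [ih (false :: l) (by simp only [List.length_cons]; push_cast; omega)]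
    rw [List.replicate_succ']
    simp

-- ===== VERDICT (by name: the statement is the Claim_ definition above) =====
theorem convertToBoolean_spec : Claim_equal_convertToBoolean := by
  intro num size _
  unfold Spec_convertToBoolean convertToBoolean convertToBoolean_alt pvBin
  simp only [pvLsb_eq, List.nil_append]
  have hfold : ∀ acc, ((if num < 0 then ['-'] else []) ++
      (if num.natAbs = 0 then ['0'] else pvBinGo num.natAbs)).foldl pvStep acc
      = acc ++ (if num.natAbs = 0 then [false] else (pvBits num.natAbs).reverse) := by
    intro acc
    rw [List.foldl_append]
    by_cases hs : num < 0 <;> by_cases h0 : num.natAbs = 0 <;>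
      simp [hs, h0, pvStep, foldA_binGo]
  show pvPadA size (List.foldl pvStep [] _) = _
  rw [hfold, List.nil_append, pvPadA_eq]
  simp only [Int.natAbs_eq_zero]
  by_cases hlt : (((if num = 0 then [false] else (pvBits num.natAbs).reverse) : List Bool).length : Int) < size
  · rw [if_pos hlt]
  · rw [if_neg hlt]
    have h0 : (size - (((if num = 0 then [false] else (pvBits num.natAbs).reverse) : List Bool).length : Int)).toNat = 0 := by omega
    rw [h0, List.replicate_zero, List.nil_append]
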